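-- pv_equiv track=rewrite | github.com/lazviktor/task_4_cve_mas | agent/agent.py | map_results
-- ===== SOURCE A (Python) =====
-- def map_results(os_family, os_pkgs, pip_pkgs, results):
--     combined = []
--     i = 0
--     if os_family in ("debian", "redhat"):
--         for p in os_pkgs:
--             combined.append(("os", p, results[i] if i < len(results) else [])); i += 1
--     for p in pip_pkgs:
--         combined.append(("pip", p, results[i] if i < len(results) else [])); i += 1
--     return combined
-- ===== SOURCE B (Python) =====
-- def map_results(os_family, os_pkgs, pip_pkgs, results):
--     head = list(os_pkgs) if os_family in ("debian", "redhat") else []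
--     pkgs = head + list(pip_pkgs)
--     tags = ["os"] * len(head) + ["pip"] * (len(pkgs) - len(head))
--     res = results[:len(pkgs)] + [[] for _ in range(len(pkgs) - len(results))]
--     return list(zip(tags, pkgs, res))
-- ===== Notes on version B (the rewrite author's own statement) =====
-- stated objective: simpler
-- what changed: B replaces A's two loops sharing a mutable counter and per-element bounds check by pad-and-zip: it truncates or pads results to the package count once, builds the tag list by replication, and returns a single parallel zip of tags, packages and results.
import Mathlib
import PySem

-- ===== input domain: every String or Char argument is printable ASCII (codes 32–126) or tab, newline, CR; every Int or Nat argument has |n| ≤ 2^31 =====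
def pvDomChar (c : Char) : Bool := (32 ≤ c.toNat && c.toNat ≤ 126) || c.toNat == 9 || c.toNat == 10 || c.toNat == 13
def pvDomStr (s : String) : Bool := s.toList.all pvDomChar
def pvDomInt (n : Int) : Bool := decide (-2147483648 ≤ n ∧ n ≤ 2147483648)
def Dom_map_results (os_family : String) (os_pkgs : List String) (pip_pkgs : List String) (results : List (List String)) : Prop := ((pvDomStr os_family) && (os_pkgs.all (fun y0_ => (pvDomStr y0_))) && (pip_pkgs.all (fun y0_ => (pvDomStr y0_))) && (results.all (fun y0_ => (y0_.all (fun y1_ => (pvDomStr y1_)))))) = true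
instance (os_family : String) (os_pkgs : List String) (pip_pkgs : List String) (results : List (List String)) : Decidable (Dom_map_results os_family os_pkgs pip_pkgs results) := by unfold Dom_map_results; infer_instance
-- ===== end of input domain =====

-- B replaces A's two counter-sharing loops by pad-and-zip: truncate/pad results to the
-- package count, then one parallel zip of tags, packages, results (objective: simpler).
-- ===== PORT A =====
-- the loop body: append (tag, p, results[i] or []) and increment i
def mrStep (results : List (List String)) (tag : String)
    (st : List (String × String × List String) × Nat) (p : String) :
    List (String × String × List String) × Nat :=
  (st.1 ++ [(tag, p, if st.2 < results.length then results.getD st.2 [] else [])], st.2 + 1)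

def map_results (os_family : String) (os_pkgs : List String) (pip_pkgs : List String) (results : List (List String)) : List (String × String × List String) :=
  let st0 : List (String × String × List String) × Nat := ([], 0)
  let st1 := if os_family = "debian" ∨ os_family = "redhat"
             then os_pkgs.foldl (mrStep results "os") st0 else st0
  (pip_pkgs.foldl (mrStep results "pip") st1).1

-- ===== PORT B =====
def map_results_alt (os_family : String) (os_pkgs : List String) (pip_pkgs : List String) (results : List (List String)) : List (String × String × List String) :=
  let head := if os_family = "debian" ∨ os_family = "redhat" then os_pkgs else []
  let pkgs := head ++ pip_pkgs
  let tags := List.replicate head.length "os" ++ List.replicate (pkgs.length - head.length) "pip"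
  let res := results.take pkgs.length ++ List.replicate (pkgs.length - results.length) ([] : List String)
  tags.zip (pkgs.zip res)

-- ===== PRECONDITION & SPEC =====
def Spec_map_results (os_family : String) (os_pkgs : List String) (pip_pkgs : List String) (results : List (List String)) (out : List (String × String × List String)) : Prop := out = map_results_alt os_family os_pkgs pip_pkgs results
instance (os_family : String) (os_pkgs : List String) (pip_pkgs : List String) (results : List (List String)) (out : List (String × String × List String)) : Decidable (Spec_map_results os_family os_pkgs pip_pkgs results out) := by unfold Spec_map_results; infer_instance

-- ===== CLAIM (what is proved, stated in full; the proofs are below) =====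
def Claim_equal_map_results : Prop := ∀ (os_family : String) (os_pkgs : List String) (pip_pkgs : List String) (results : List (List String)), Dom_map_results os_family os_pkgs pip_pkgs results → Spec_map_results os_family os_pkgs pip_pkgs results (map_results os_family os_pkgs pip_pkgs results)

-- ===== LEMMAS AND PROOFS =====

-- the slice of results that A's counter sees for n packages starting at index i
def alignFrom (rs : List (List String)) (i n : Nat) : List (List String) :=
  (rs.drop i).take n ++ List.replicate (n - (rs.length - i)) ([] : List String)

theorem alignFrom_length (rs : List (List String)) (i n : Nat) :
    (alignFrom rs i n).length = n := by
  simp [alignFrom]; omega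

theorem alignFrom_cons (rs : List (List String)) (i n : Nat) :
    alignFrom rs i (n + 1) =
      (if i < rs.length then rs.getD i [] else []) :: alignFrom rs (i + 1) n := by
  by_cases h : i < rs.length
  · have hd : rs.drop i = rs[i] :: rs.drop (i + 1) := List.drop_eq_getElem_cons h
    have hsub : (n + 1) - (rs.length - i) = n - (rs.length - (i + 1)) := by omega
    simp only [alignFrom, hd, List.take_succ_cons, List.cons_append, hsub, if_pos h,
      List.getD_eq_getElem?_getD, List.getElem?_eq_getElem h, Option.getD_some]
  · have h1 : rs.drop i = [] := List.drop_eq_nil_of_le (by omega)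
    have h2 : rs.drop (i + 1) = [] := List.drop_eq_nil_of_le (by omega)
    have hsub : (n + 1) - (rs.length - i) = n + 1 := by omega
    have hsub2 : n - (rs.length - (i + 1)) = n := by omega
    simp [alignFrom, h1, h2, hsub, hsub2, h, List.replicate_succ]

theorem alignFrom_split' (rs : List (List String)) (h k : Nat) :
    ∀ i, alignFrom rs i (h + k) = alignFrom rs i h ++ alignFrom rs (i + h) k := by
  induction h with
  | zero => intro i; simp [alignFrom]
  | succ m ih =>
    intro i
    have e1 : (m + 1) + k = (m + k) + 1 := by omega
    have e2 : i + (m + 1) = (i + 1) + m := by omega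
    rw [e1, alignFrom_cons, alignFrom_cons, ih (i + 1), e2, List.cons_append]

theorem alignFrom_split (rs : List (List String)) (h k : Nat) :
    alignFrom rs 0 (h + k) = alignFrom rs 0 h ++ alignFrom rs h k := by
  have := alignFrom_split' rs h k 0
  simpa using this
-- A's loop over ps with counter i and accumulator acc = acc ++ the zip of the
-- constant tag, ps, and the aligned results slice starting at i
theorem mr_loop_eq (results : List (List String)) (tag : String) (ps : List String) :
    ∀ (i : Nat) (acc : List (String × String × List String)),
    ps.foldl (mrStep results tag) (acc, i) =
      (acc ++ (List.replicate ps.length tag).zip (ps.zip (alignFrom results i ps.length)),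
       i + ps.length) := by
  induction ps with
  | nil => intro i acc; simp [alignFrom]
  | cons p rest ih =>
    intro i acc
    simp only [List.foldl_cons, mrStep, ih (i + 1), List.length_cons,
      alignFrom_cons, List.replicate_succ, List.zip_cons_cons]
    refine Prod.ext ?_ (by simp; omega)
    simp [List.append_assoc]

theorem alignFrom_zero (rs : List (List String)) (n : Nat) :
    alignFrom rs 0 n = rs.take n ++ List.replicate (n - rs.length) ([] : List String) := by
  simp [alignFrom]

-- ===== VERDICT (by name: the statement is the Claim_ definition above) =====
theorem map_results_spec : Claim_equal_map_results := by
  intro os_family os_pkgs pip_pkgs results _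
  unfold Spec_map_results map_results map_results_alt
  by_cases h : os_family = "debian" ∨ os_family = "redhat"
  · simp only [h, if_pos, mr_loop_eq, List.nil_append, List.length_append,
      Nat.add_sub_cancel_left, Nat.zero_add, ← alignFrom_zero, alignFrom_split]
    rw [List.zip_append (by simp [alignFrom_length]),
        List.zip_append (by simp [alignFrom_length])]
  · simp only [h, if_neg, not_false_iff, mr_loop_eq, List.nil_append, List.length_nil,
      Nat.zero_add, Nat.sub_zero, ← alignFrom_zero]
    simp
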